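-- pv_equiv track=rewrite | github.com/joytianya/MailboxNameEvaluation | pattern_check.py | is_num_alpha
-- ===== SOURCE A (Python) =====
-- def is_num_alpha(s):
--     if s[0]>'9' or s[0]<'0':
--         return 0
--     alp=""
--     num=""
--     flag=0
--     flag_0=0
--     flag_1=0
--     for i in range(len(s)):
--         if flag==0:
--             if s[i]<='z' and s[i]>='a':
--                 flag = 1
--                 alp+=s[i]
--             elif s[i]<='9' and s[i]>='0':
--
--                 num+=s[i]
--             else:
--                 flag_0=1
--                 break
--
--         else:
--             if s[i] <= 'z' and s[i] >= 'a':
--                 num+=s[i]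
--             else:
--                 flag_0 = 1
--                 break
--     if len(alp)>0 and flag_0!=1 :
--
--         return 1
--     else:
--         return 0
-- ===== SOURCE B (Python) =====
-- def is_num_alpha(s):
--     # two-pass: advance over the leading digit run, then check the suffix is
--     # a nonempty run of lowercase letters
--     i = 0
--     n = len(s)
--     while i < n and '0' <= s[i] <= '9':
--         i += 1
--     if 0 < i < n and all('a' <= c <= 'z' for c in s[i:]):
--         return 1
--     return 0
-- ===== Notes on version B (the rewrite author's own statement) =====
-- stated objective: simpler
-- what changed: Replaces the state-flag accumulator loop (alp/num/flag/flag_0 with break) by a two-pass scan: advance an index over the digit prefix, then check the remaining suffix is nonempty and all lowercase.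
import Mathlib
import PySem

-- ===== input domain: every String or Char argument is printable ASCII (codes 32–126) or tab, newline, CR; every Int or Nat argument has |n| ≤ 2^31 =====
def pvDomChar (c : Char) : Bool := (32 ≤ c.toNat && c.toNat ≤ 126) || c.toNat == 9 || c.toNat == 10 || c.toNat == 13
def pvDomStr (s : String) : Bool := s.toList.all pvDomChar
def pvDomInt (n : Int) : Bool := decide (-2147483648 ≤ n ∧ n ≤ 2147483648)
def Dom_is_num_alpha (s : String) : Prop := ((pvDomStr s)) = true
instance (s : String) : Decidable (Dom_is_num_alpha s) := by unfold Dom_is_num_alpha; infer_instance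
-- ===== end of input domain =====

-- B replaces A's state-flag loop by a two-pass scan (digit prefix, then lowercase suffix);
-- equivalence is claimed on nonempty strings (A raises IndexError on "").

-- ===== PORT A =====
-- A's for-loop with state (alp, num, flag, flag_0); 'break' is modeled by returning the
-- current state with flag_0 = 1.  (flag_1 is assigned 0 and never read; it is omitted.)
def isNumAlphaLoopA : List Char → List Char → List Char → Int → Int →
    (List Char × List Char × Int × Int)
  | [], alp, num, flag, flag0 => (alp, num, flag, flag0)
  | c :: rest, alp, num, flag, flag0 =>
    if flag = 0 then
      if c ≤ 'z' ∧ 'a' ≤ c then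
        isNumAlphaLoopA rest (alp ++ [c]) num 1 flag0
      else if c ≤ '9' ∧ '0' ≤ c then
        isNumAlphaLoopA rest alp (num ++ [c]) flag flag0
      else (alp, num, flag, 1)
    else
      if c ≤ 'z' ∧ 'a' ≤ c then
        isNumAlphaLoopA rest alp (num ++ [c]) flag flag0
      else (alp, num, flag, 1)

def is_num_alpha (s : String) : Int :=
  match PySem.Str.pyGet? s 0 with
  | none => 0   -- unreachable under Pre_: Python raises IndexError on ""
  | some c0 =>
    if '9' < c0 ∨ c0 < '0' then 0
    else
      let res := isNumAlphaLoopA s.toList [] [] 0 0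
      if res.1.length > 0 ∧ res.2.2.2 ≠ 1 then 1 else 0

-- ===== PORT B =====
-- B's while-loop: the length of the leading digit run
def digitRunB : List Char → Nat
  | [] => 0
  | c :: rest => if '0' ≤ c ∧ c ≤ '9' then 1 + digitRunB rest else 0

def is_num_alpha_alt (s : String) : Int :=
  let l := s.toList
  let i := digitRunB l
  if 0 < i ∧ i < l.length ∧ (l.drop i).all (fun c => decide ('a' ≤ c ∧ c ≤ 'z')) then 1 else 0

-- ===== PRECONDITION & SPEC =====
-- Pre_ excludes only the empty string, on which Python A raises IndexError (s[0]).
def Pre_is_num_alpha (s : String) : Prop := s ≠ ""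
instance (s : String) : Decidable (Pre_is_num_alpha s) := by unfold Pre_is_num_alpha; infer_instance
def pvWitness_is_num_alpha : String := "12ab"

def Spec_is_num_alpha (s : String) (out : Int) : Prop := out = is_num_alpha_alt s
instance (s : String) (out : Int) : Decidable (Spec_is_num_alpha s out) := by unfold Spec_is_num_alpha; infer_instance

-- ===== CLAIM (what is proved, stated in full; the proofs are below) =====
def Claim_equal_is_num_alpha : Prop := ∀ (s : String), Dom_is_num_alpha s → Pre_is_num_alpha s → Spec_is_num_alpha s (is_num_alpha s)

-- ===== LEMMAS AND PROOFS =====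

-- Phase 1 of A's loop (flag = 1): it keeps alp, and ends with flag_0 = 0 iff all
-- remaining characters are lowercase.
lemma loopA_phase1 (l : List Char) (alp num : List Char) :
    ∃ num', isNumAlphaLoopA l alp num 1 0 =
      (alp, num', 1, if l.all (fun c => decide ('a' ≤ c ∧ c ≤ 'z')) then 0 else 1) := by
  induction l generalizing num with
  | nil => exact ⟨num, by simp [isNumAlphaLoopA]⟩
  | cons c rest ih =>
    by_cases hc : 'a' ≤ c ∧ c ≤ 'z'
    · obtain ⟨num', h⟩ := ih (num ++ [c])
      exact ⟨num', by simp [isNumAlphaLoopA, hc.1, hc.2, h]⟩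
    · refine ⟨num, ?_⟩
      have hc' : ¬ (c ≤ 'z' ∧ 'a' ≤ c) := fun h => hc ⟨h.2, h.1⟩
      simp only [isNumAlphaLoopA, if_neg hc']
      simp [List.all_cons, hc]

-- Phase 0 of A's loop from the initial state: characterized by the digit run.
lemma loopA_phase0 (l : List Char) (num : List Char) :
    ∃ num', isNumAlphaLoopA l [] num 0 0 =
      match l.drop (digitRunB l) with
      | [] => ([], num', 0, 0)
      | c :: r =>
        if 'a' ≤ c ∧ c ≤ 'z' then
          ([c], num', 1, if r.all (fun c => decide ('a' ≤ c ∧ c ≤ 'z')) then 0 else 1)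
        else ([], num', 0, 1) := by
  induction l generalizing num with
  | nil => exact ⟨num, by simp [isNumAlphaLoopA, digitRunB]⟩
  | cons c rest ih =>
    by_cases hlow : 'a' ≤ c ∧ c ≤ 'z'
    · -- lowercase first char: not a digit, run = 0
      have hnd : ¬ ('0' ≤ c ∧ c ≤ '9') := by
        rintro ⟨-, h9⟩
        exact absurd (le_trans hlow.1 h9) (by decide)
      obtain ⟨num', h1⟩ := loopA_phase1 rest [c] num
      refine ⟨num', ?_⟩
      simp only [digitRunB, if_neg hnd, List.drop_zero, if_pos hlow]
      simpa [isNumAlphaLoopA, hlow.1, hlow.2] using h1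
    · by_cases hd : '0' ≤ c ∧ c ≤ '9'
      · -- digit: consume it, stay in phase 0
        obtain ⟨num', h⟩ := ih (num ++ [c])
        refine ⟨num', ?_⟩
        have hlow' : ¬ (c ≤ 'z' ∧ 'a' ≤ c) := fun h => hlow ⟨h.2, h.1⟩
        simp only [digitRunB, if_pos hd]
        have hdrop : (c :: rest).drop (1 + digitRunB rest) = rest.drop (digitRunB rest) := by
          simp [Nat.add_comm]
        rw [hdrop]
        simpa [isNumAlphaLoopA, hlow', hd.1, hd.2] using h
      · -- neither: break with flag_0 = 1
        refine ⟨num, ?_⟩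
        have hlow' : ¬ (c ≤ 'z' ∧ 'a' ≤ c) := fun h => hlow ⟨h.2, h.1⟩
        have hd' : ¬ (c ≤ '9' ∧ '0' ≤ c) := fun h => hd ⟨h.2, h.1⟩
        simp only [digitRunB, if_neg hd, List.drop_zero]
        simp [isNumAlphaLoopA, hlow', hd', hlow]

lemma digitRunB_le (l : List Char) : digitRunB l ≤ l.length := by
  induction l with
  | nil => simp [digitRunB]
  | cons c rest ih =>
    simp only [digitRunB]
    split
    · simp only [List.length_cons]; omega
    · exact Nat.zero_le _

lemma digitRunB_pos (c : Char) (rest : List Char) (h : '0' ≤ c ∧ c ≤ '9') :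
    digitRunB (c :: rest) = 1 + digitRunB rest := by simp [digitRunB, h]

-- ===== VERDICT (by name: the statement is the Claim_ definition above) =====
theorem is_num_alpha_spec : Claim_equal_is_num_alpha := by
  intro s _ hpre
  unfold Spec_is_num_alpha is_num_alpha is_num_alpha_alt
  have hne : s.toList ≠ [] := fun h => hpre (by rwa [String.toList_eq_nil_iff] at h)
  obtain ⟨c, rest, hl⟩ : ∃ c rest, s.toList = c :: rest := by
    cases h : s.toList with
    | nil => exact absurd h hne
    | cons a b => exact ⟨a, b, rfl⟩
  rw [hl]
  have hget : PySem.Str.pyGet? s 0 = some c := by simp [hl]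
  rw [hget]
  simp only []
  by_cases hd : '0' ≤ c ∧ c ≤ '9'
  · -- first char is a digit: use the phase-0 characterization
    have hguard : ¬ ('9' < c ∨ c < '0') := by
      rintro (h | h) <;> [exact absurd hd.2 (not_le.mpr h); exact absurd hd.1 (not_le.mpr h)]
    simp only [if_neg hguard]
    obtain ⟨num', hchar⟩ := loopA_phase0 (c :: rest) []
    have hrun := digitRunB_pos c rest hd
    have hle := digitRunB_le rest
    simp only [hchar]
    cases hdrop : (c :: rest).drop (digitRunB (c :: rest)) with
    | nil =>
      -- digit run covers the whole string: A gives 0 (alp empty); B gives 0 (i = length)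
      have hlen : (c :: rest).length ≤ digitRunB (c :: rest) := by
        by_contra hlt
        exact absurd hdrop (by simp [List.drop_eq_nil_iff] at *; omega)
      simp only []
      rw [if_neg (by simp), if_neg (by simp at hlen ⊢; omega)]
    | cons c' r' =>
      have hlt : digitRunB (c :: rest) < (c :: rest).length := by
        by_contra hge
        rw [List.drop_eq_nil_of_le (by omega)] at hdrop
        exact absurd hdrop (by simp)
      by_cases hlow : 'a' ≤ c' ∧ c' ≤ 'z'
      · simp only [if_pos hlow]
        by_cases hr : r'.all (fun c => decide ('a' ≤ c ∧ c ≤ 'z')) = true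
        · rw [if_pos hr]
          simp only [if_pos (show ([c'] : List Char).length > 0 ∧ (0 : Int) ≠ 1 by simp)]
          rw [if_pos ⟨by omega, hlt, by simp [hlow.1, hlow.2]; simpa using hr⟩]
        · rw [if_neg (by simpa using hr)]
          rw [if_neg (by
            intro h
            apply hr
            have hall := h.2.2
            simp only [List.all_cons, Bool.and_eq_true] at hall
            exact hall.2)]
      · simp only [if_neg hlow]
        rw [if_neg (show ¬(((([] : List Char), num', (0:Int), (1:Int)) :
            List Char × List Char × Int × Int).1.length > 0 ∧
            ((([] : List Char), num', (0:Int), (1:Int)) :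
            List Char × List Char × Int × Int).2.2.2 ≠ 1) by simp)]
        rw [if_neg (by
          intro h
          have hall := h.2.2
          simp only [List.all_cons, Bool.and_eq_true, decide_eq_true_eq] at hall
          exact hlow hall.1)]
  · -- first char not a digit: A's guard fires, B's run is empty
    have hguard : '9' < c ∨ c < '0' := by
      rcases not_and_or.mp hd with h | h
      · exact Or.inr (not_le.mp h)
      · exact Or.inl (not_le.mp h)
    simp only [if_pos hguard]
    have hrun : digitRunB (c :: rest) = 0 := by simp [digitRunB, hd]
    rw [if_neg (by rw [hrun]; exact fun h => absurd h.1 (by simp))]
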